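-- pv_equiv track=rewrite | github.com/namdev26/Python-Code-PTIT | PY01037.py | compute_anti_primes
-- ===== SOURCE A (Python) =====
-- def compute_anti_primes(limit):
--     # Initialize the array to count divisors
--     divisor_count = [0] * (limit + 1)
--
--     # Compute number of divisors for each number
--     for i in range(1, limit + 1):
--         for j in range(i, limit + 1, i):
--             divisor_count[j] += 1
--
--     # List to store anti-primes
--     anti_primes = []
--     max_divisors = 0
--
--     # Identify anti-primes
--     for i in range(1, limit + 1):
--         if divisor_count[i] > max_divisors:
--             anti_primes.append(i)
--             max_divisors = divisor_count[i]
--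
--     return anti_primes
-- ===== SOURCE B (Python) =====
-- def compute_anti_primes(limit):
--     # Count divisors by enumerating divisor PAIRS (i, m // i) with i*i <= m:
--     # the outer loop only runs up to sqrt(limit); each multiple of i above i*i
--     # gains a pair of divisors at once, the square i*i gains a single one.
--     divisor_count = [0] * (limit + 1)
--     i = 1
--     while i * i <= limit:
--         divisor_count[i * i] += 1
--         for j in range(i * (i + 1), limit + 1, i):
--             divisor_count[j] += 2
--         i += 1
--
--     anti_primes = []
--     max_divisors = 0
--     for m in range(1, limit + 1):
--         if divisor_count[m] > max_divisors:
--             anti_primes.append(m)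
--             max_divisors = divisor_count[m]
--     return anti_primes
-- ===== Notes on version B (the rewrite author's own statement) =====
-- stated objective: faster
-- what changed: B counts divisors by enumerating divisor pairs (i, m//i) with i*i <= m - an outer loop only up to sqrt(limit) that credits each multiple of i above the square i*i with a pair of divisors at once and the square itself with a single one - instead of A's full sieve that walks all multiples of every i up to limit; the record scan then reads the same counts.
import Mathlib
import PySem

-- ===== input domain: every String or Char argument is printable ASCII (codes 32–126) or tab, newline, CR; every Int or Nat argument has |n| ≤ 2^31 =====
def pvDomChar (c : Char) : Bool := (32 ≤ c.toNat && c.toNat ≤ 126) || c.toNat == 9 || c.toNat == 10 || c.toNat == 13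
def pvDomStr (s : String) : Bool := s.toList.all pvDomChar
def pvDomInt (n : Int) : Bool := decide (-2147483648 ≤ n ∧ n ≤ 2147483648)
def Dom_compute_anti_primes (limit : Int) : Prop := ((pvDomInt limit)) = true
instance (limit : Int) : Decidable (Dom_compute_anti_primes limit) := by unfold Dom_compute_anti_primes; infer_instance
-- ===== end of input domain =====

-- B replaces A's full divisor sieve (all multiples of every i ≤ limit) by a divisor-PAIR
-- sieve whose outer loop only runs while i*i ≤ limit (each multiple of i above the square
-- i*i gains a pair of divisors at once, the square a single one); measured constant-factor speedup.

-- ===== PORT A =====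
-- Python list indexing/assignment on the divisor-count table, ported by hand onto Array
-- (Python's list IS a constant-time array). Exact for 0 <= i < len(xs) — the only indices
-- either program uses; out-of-range reads return d, writes are dropped (never reached).
def pyArrGetD (xs : Array Int) (i : Int) (d : Int) : Int :=
  if h : 0 ≤ i ∧ i.toNat < xs.size then xs[i.toNat] else d

def pyArrSet (xs : Array Int) (i : Int) (v : Int) : Array Int :=
  if h : 0 ≤ i ∧ i.toNat < xs.size then xs.set i.toNat v h.2 else xs

def compute_anti_primes (limit : Int) : List Int :=
  -- divisor_count = [0] * (limit + 1)
  let dc0 : Array Int := Array.replicate (limit + 1).toNat 0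
  -- for i in range(1, limit+1): for j in range(i, limit+1, i): divisor_count[j] += 1
  let dc :=
    (PySem.List.pyRange 1 (limit + 1) 1).foldl (fun dc i =>
      (PySem.List.pyRange i (limit + 1) i).foldl (fun dc j =>
        pyArrSet dc j (pyArrGetD dc j 0 + 1)) dc) dc0
  -- for i in range(1, limit+1): if divisor_count[i] > max_divisors: append i, update max
  ((PySem.List.pyRange 1 (limit + 1) 1).foldl (fun (st : List Int × Int) i =>
      if pyArrGetD dc i 0 > st.2 then
        (st.1 ++ [i], pyArrGetD dc i 0)
      else st) ([], 0)).1

-- ===== PORT B =====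
-- needed by pairSieve's decreasing_by
theorem pv_le_mul_self (i : Int) : i ≤ i * i := by
  rcases lt_or_ge i 0 with h | h
  · nlinarith
  · nlinarith

-- the `while i * i <= limit` loop of Source B
def pairSieve (limit : Int) (dc : Array Int) (i : Int) : Array Int :=
  if _h : i * i ≤ limit then
    pairSieve limit
      ((PySem.List.pyRange (i * (i + 1)) (limit + 1) i).foldl
        (fun dc j => pyArrSet dc j (pyArrGetD dc j 0 + 2))
        (pyArrSet dc (i * i) (pyArrGetD dc (i * i) 0 + 1)))
      (i + 1)
  else dc
termination_by (limit + 1 - i).toNat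
decreasing_by
  have := pv_le_mul_self i
  omega

def compute_anti_primes_alt (limit : Int) : List Int :=
  let dc := pairSieve limit (Array.replicate (limit + 1).toNat 0) 1
  ((PySem.List.pyRange 1 (limit + 1) 1).foldl (fun (st : List Int × Int) m =>
      if pyArrGetD dc m 0 > st.2 then
        (st.1 ++ [m], pyArrGetD dc m 0)
      else st) ([], 0)).1

-- ===== PRECONDITION & SPEC =====
def Spec_compute_anti_primes (limit : Int) (out : List Int) : Prop := out = compute_anti_primes_alt limit
instance (limit : Int) (out : List Int) : Decidable (Spec_compute_anti_primes limit out) := by unfold Spec_compute_anti_primes; infer_instance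

-- ===== CLAIM (what is proved, stated in full; the proofs are below) =====
def Claim_equal_compute_anti_primes : Prop := ∀ (limit : Int), Dom_compute_anti_primes limit → Spec_compute_anti_primes limit (compute_anti_primes limit)

-- ===== LEMMAS AND PROOFS =====

theorem size_pyArrSet (xs : Array Int) (i v : Int) : (pyArrSet xs i v).size = xs.size := by
  unfold pyArrSet
  split_ifs <;> simp

theorem pyArrGetD_pyArrSet (xs : Array Int) (j p v : Int)
    (hj0 : 0 ≤ j) (hjs : j < (xs.size : Int)) (hp : 0 ≤ p) :
    pyArrGetD (pyArrSet xs j v) p 0 = if p = j then v else pyArrGetD xs p 0 := by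
  unfold pyArrSet
  rw [dif_pos ⟨hj0, by omega⟩]
  unfold pyArrGetD
  by_cases hps : p.toNat < xs.size
  · rw [dif_pos ⟨hp, by simpa using hps⟩, dif_pos ⟨hp, hps⟩]
    rw [Array.getElem_set]
    by_cases hpj : p = j
    · rw [if_pos (by omega), if_pos hpj]
    · rw [if_neg (by omega), if_neg hpj]
  · rw [dif_neg (by simp; omega), dif_neg (by omega)]
    rw [if_neg (by omega)]

theorem foldl_bump_size (c : Int) (L : List Int) (dc : Array Int) :
    (L.foldl (fun dc j => pyArrSet dc j (pyArrGetD dc j 0 + c)) dc).size = dc.size := by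
  induction L generalizing dc with
  | nil => rfl
  | cons j t ih => simp [List.foldl_cons, ih, size_pyArrSet]

theorem foldl_bump_get (c : Int) (L : List Int) (dc : Array Int) (p : Int)
    (hL : ∀ j ∈ L, 0 ≤ j ∧ j < (dc.size : Int)) (hp : 0 ≤ p) :
    pyArrGetD (L.foldl (fun dc j => pyArrSet dc j (pyArrGetD dc j 0 + c)) dc) p 0
      = pyArrGetD dc p 0 + c * (L.count p : Int) := by
  induction L generalizing dc with
  | nil => simp
  | cons j t ih =>
    obtain ⟨hj0, hjlen⟩ := hL j (List.mem_cons_self ..)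
    rw [List.foldl_cons, ih _ (fun x hx => by
        simpa [size_pyArrSet] using hL x (List.mem_cons_of_mem _ hx))]
    rw [pyArrGetD_pyArrSet dc j p _ hj0 hjlen hp]
    by_cases hpj : p = j
    · subst hpj
      rw [if_pos rfl, List.count_cons, if_pos (by simp)]
      push_cast
      ring
    · rw [if_neg hpj, List.count_cons, if_neg (by simp [Ne.symm hpj])]
      simp

theorem nodup_pyRange_pos (a b : Int) {s : Int} (hs : 0 < s) :
    (PySem.List.pyRange a b s).Nodup := by
  rw [PySem.List.pyRange_of_pos a b hs]
  refine List.Nodup.map ?_ (List.nodup_range)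
  intro k1 k2 h
  have : s * (k1 : Int) = s * (k2 : Int) := by linarith
  have := mul_left_cancel₀ (by omega : s ≠ 0) this
  exact_mod_cast this

theorem count_pyRange_pos (a b p : Int) {s : Int} (hs : 0 < s) :
    ((PySem.List.pyRange a b s).count p : Int)
      = if p ∈ PySem.List.pyRange a b s then 1 else 0 := by
  by_cases h : p ∈ PySem.List.pyRange a b s
  · rw [if_pos h]
    have := List.count_eq_one_of_mem (nodup_pyRange_pos a b hs) h
    exact_mod_cast congrArg (fun n : Nat => (n : Int)) this
  · rw [if_neg h]
    simp [List.count_eq_zero_of_not_mem h]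

theorem foldl_sieve_get (c : Int) (M : List Int) (G : Int → List Int) (dc : Array Int) (p : Int)
    (hG : ∀ i ∈ M, ∀ j ∈ G i, 0 ≤ j ∧ j < (dc.size : Int)) (hp : 0 ≤ p) :
    pyArrGetD
        (M.foldl (fun dc i =>
          (G i).foldl (fun dc j => pyArrSet dc j (pyArrGetD dc j 0 + c)) dc) dc) p 0
      = pyArrGetD dc p 0 + c * ((M.map (fun i => ((G i).count p : Int))).sum) := by
  induction M generalizing dc with
  | nil => simp
  | cons i t ih =>
    rw [List.foldl_cons, ih _ (fun x hx j hj => by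
        simpa [foldl_bump_size] using hG x (List.mem_cons_of_mem _ hx) j hj)]
    rw [foldl_bump_get c _ _ _ (hG i (List.mem_cons_self ..)) hp]
    simp [List.map_cons, List.sum_cons]
    ring

def pvDC (p : Int) : Int := ((PySem.List.pyRange 1 (p + 1) 1).countP (fun i => decide (i ∣ p)) : Int)

theorem dvd_sub_self_iff (i p : Int) : i ∣ p - i ↔ i ∣ p :=
  ⟨fun h => by simpa using dvd_add h (dvd_refl i), fun h => dvd_sub h (dvd_refl i)⟩

theorem aVal (limit p : Int) (h1 : 1 ≤ p) (h2 : p ≤ limit) :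
    pyArrGetD
      ((PySem.List.pyRange 1 (limit + 1) 1).foldl (fun dc i =>
        (PySem.List.pyRange i (limit + 1) i).foldl (fun dc j =>
          pyArrSet dc j (pyArrGetD dc j 0 + 1)) dc)
        (Array.replicate (limit + 1).toNat 0)) p 0 = pvDC p := by
  have hlen : ((Array.replicate (limit + 1).toNat (0:Int)).size : Int) = limit + 1 := by
    simp
    omega
  rw [foldl_sieve_get 1 _ _ _ p (fun i hi j hj => by
      rw [PySem.List.mem_pyRange_one] at hi
      rw [PySem.List.mem_pyRange_iff_of_pos (by omega) j] at hj
      constructor <;> omega) (by omega)]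
  have hz : pyArrGetD (Array.replicate (limit + 1).toNat (0:Int)) p 0 = 0 := by
    unfold pyArrGetD
    split_ifs <;> simp
  rw [hz, zero_add, one_mul]
  -- evaluate each inner count
  have hcong1 : ∀ i ∈ PySem.List.pyRange 1 (limit + 1) 1,
      ((PySem.List.pyRange i (limit + 1) i).count p : Int) = (fun i => if i ∣ p ∧ i ≤ p then (1:Int) else 0) i := by
    intro i hi
    rw [PySem.List.mem_pyRange_one] at hi
    rw [count_pyRange_pos _ _ _ (by omega)]
    congr 1
    simp only [eq_iff_iff]
    rw [PySem.List.mem_pyRange_iff_of_pos (by omega) p, dvd_sub_self_iff]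
    constructor
    · rintro ⟨hip, -, hd⟩; exact ⟨hd, hip⟩
    · rintro ⟨hd, hip⟩; exact ⟨hip, by omega, hd⟩
  rw [List.map_congr_left hcong1]
  -- split the range at p+1
  rw [PySem.List.pyRange_one_append 1 (p+1) (limit+1) (by omega) (by omega)]
  rw [List.map_append, List.sum_append]
  have hz2 : ((PySem.List.pyRange (p+1) (limit+1) 1).map (fun i => if i ∣ p ∧ i ≤ p then (1:Int) else 0)).sum = 0 := by
    apply List.sum_eq_zero
    intro x hx
    simp only [List.mem_map] at hx
    obtain ⟨i, hi, rfl⟩ := hx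
    rw [PySem.List.mem_pyRange_one] at hi
    rw [if_neg (by omega)]
  rw [hz2, add_zero]
  have hcong2 : ∀ i ∈ PySem.List.pyRange 1 (p + 1) 1,
      (fun i => if i ∣ p ∧ i ≤ p then (1:Int) else 0) i
        = (fun i => if (fun i => decide (i ∣ p)) i = true then (1:Int) else 0) i := by
    intro i hi
    rw [PySem.List.mem_pyRange_one] at hi
    simp only []
    by_cases hd : i ∣ p
    · rw [if_pos ⟨hd, by omega⟩, if_pos (by simpa using hd)]
    · rw [if_neg (by tauto), if_neg (by simpa using hd)]
  rw [List.map_congr_left hcong2]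
  rw [PySem.List.sum_map_ite_one_zero]
  rfl

def pvR (limit : Int) : Int := (limit.toNat.sqrt : Int)

theorem le_pvR_iff (limit i : Int) (hi : 1 ≤ i) : i ≤ pvR limit ↔ i * i ≤ limit := by
  unfold pvR
  rcases lt_or_ge limit 0 with h | h
  · constructor
    · intro hle
      exfalso
      have : limit.toNat = 0 := by omega
      rw [this] at hle
      simp at hle
      omega
    · intro hle
      nlinarith
  · have hcast : ((limit.toNat : Int)) = limit := by omega
    constructor
    · intro hle
      have h2 : i.toNat ≤ limit.toNat.sqrt := by omega
      have := Nat.le_sqrt.mp h2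
      have h3 : ((i.toNat * i.toNat : Nat) : Int) ≤ ((limit.toNat : Nat) : Int) := by exact_mod_cast this
      push_cast at h3
      rw [Int.toNat_of_nonneg (by omega)] at h3
      omega
    · intro hle
      have h2 : i.toNat * i.toNat ≤ limit.toNat := by
        have : ((i.toNat * i.toNat : Nat) : Int) ≤ (limit.toNat : Int) := by
          push_cast
          rw [Int.toNat_of_nonneg (by omega)]
          omega
        exact_mod_cast this
      have := Nat.le_sqrt.mpr h2
      omega

def bTotal (limit i p : Int) : Int :=
  if i * i ≤ limit then
    ((if i * i = p then 1 else 0)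
      + (if p ∈ PySem.List.pyRange (i * (i + 1)) (limit + 1) i then 2 else 0))
      + bTotal limit (i + 1) p
  else 0
termination_by (limit + 1 - i).toNat
decreasing_by
  have := pv_le_mul_self i
  omega

theorem pairSieve_get_aux (n : Nat) : ∀ (limit : Int) (dc : Array Int) (i p : Int),
    (limit + 1 - i).toNat ≤ n → 1 ≤ i → (dc.size : Int) = limit + 1 → 0 ≤ p →
    pyArrGetD (pairSieve limit dc i) p 0
      = pyArrGetD dc p 0 + bTotal limit i p := by
  induction n with
  | zero =>
    intro limit dc i p hn hi hlen hp
    have hno : ¬ i * i ≤ limit := by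
      have := pv_le_mul_self i
      omega
    rw [pairSieve, bTotal, dif_neg hno, if_neg hno, add_zero]
  | succ n ih =>
    intro limit dc i p hn hi hlen hp
    by_cases h : i * i ≤ limit
    · rw [pairSieve, bTotal, dif_pos h, if_pos h]
      have hii := pv_le_mul_self i
      have hlen1 : ((pyArrSet dc (i*i) (pyArrGetD dc (i*i) 0 + 1)).size : Int)
          = limit + 1 := by rw [size_pyArrSet]; exact hlen
      have hL : ∀ j ∈ PySem.List.pyRange (i*(i+1)) (limit+1) i,
          0 ≤ j ∧ j < (((pyArrSet dc (i*i) (pyArrGetD dc (i*i) 0 + 1)).size : Nat) : Int) := by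
        intro j hj
        rw [PySem.List.mem_pyRange_iff_of_pos (by omega) j] at hj
        rw [hlen1]
        constructor <;> nlinarith [hj.1, hj.2.1]
      have hlen2 : (((PySem.List.pyRange (i*(i+1)) (limit+1) i).foldl
            (fun dc j => pyArrSet dc j (pyArrGetD dc j 0 + 2))
            (pyArrSet dc (i*i) (pyArrGetD dc (i*i) 0 + 1))).size : Int)
          = limit + 1 := by rw [foldl_bump_size]; exact hlen1
      rw [ih limit _ (i+1) p (by omega) (by omega) hlen2 hp]
      rw [foldl_bump_get 2 _ _ p hL hp]
      rw [count_pyRange_pos _ _ _ (by omega : (0:Int) < i)]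
      have key := pyArrGetD_pyArrSet dc (i*i) p
          (pyArrGetD dc (i*i) 0 + 1) (by nlinarith) (by omega) hp
      rw [key]
      by_cases hsq : i * i = p
      · rw [if_pos (by omega), if_pos hsq]
        subst hsq
        split_ifs <;> ring
      · rw [if_neg (by omega), if_neg hsq]
        split_ifs <;> ring
    · rw [pairSieve, bTotal, dif_neg h, if_neg h, add_zero]

theorem bTotal_eq_sum_aux (n : Nat) : ∀ (limit i p : Int), (limit + 1 - i).toNat ≤ n → 1 ≤ i →
    bTotal limit i p
      = ((PySem.List.pyRange i (pvR limit + 1) 1).map (fun k =>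
          (if k * k = p then (1 : Int) else 0)
          + (if p ∈ PySem.List.pyRange (k * (k + 1)) (limit + 1) k then 2 else 0))).sum := by
  induction n with
  | zero =>
    intro limit i p hn hi
    have hno : ¬ i * i ≤ limit := by
      have := pv_le_mul_self i
      omega
    have hR : pvR limit < i := by
      by_contra hc
      exact hno ((le_pvR_iff limit i hi).mp (by omega))
    rw [bTotal, if_neg hno, PySem.List.pyRange_one_eq_nil (by omega)]
    simp
  | succ n ih =>
    intro limit i p hn hi
    by_cases h : i * i ≤ limit
    · have hii := pv_le_mul_self i
      have hR : i ≤ pvR limit := (le_pvR_iff limit i hi).mpr h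
      rw [bTotal, if_pos h, PySem.List.pyRange_one_cons (by omega : i < pvR limit + 1)]
      rw [List.map_cons, List.sum_cons, ih limit (i+1) p (by omega) (by omega)]
    · have hR : pvR limit < i := by
        by_contra hc
        exact h ((le_pvR_iff limit i hi).mp (by omega))
      rw [bTotal, if_neg h, PySem.List.pyRange_one_eq_nil (by omega)]
      simp

theorem countP_pyRange_eq_card (a b : Int) (pr : Int → Bool) :
    (PySem.List.pyRange a (b + 1) 1).countP pr
      = ((Finset.Icc a b).filter (fun k => pr k = true)).card := by
  rw [List.countP_eq_length_filter]
  rw [← List.toFinset_card_of_nodup ((PySem.List.nodup_pyRange_one a (b+1)).filter pr)]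
  congr 1
  ext x
  simp only [List.mem_toFinset, List.mem_filter, Finset.mem_filter, Finset.mem_Icc,
    PySem.List.mem_pyRange_one]
  constructor
  · rintro ⟨⟨h1, h2⟩, h3⟩; exact ⟨⟨h1, by omega⟩, h3⟩
  · rintro ⟨⟨h1, h2⟩, h3⟩; exact ⟨⟨h1, by omega⟩, h3⟩

theorem div_facts (p k : Int) (h1 : 1 ≤ p) (hk1 : 1 ≤ k) (hkd : k ∣ p) :
    1 ≤ p / k ∧ p / k ∣ p ∧ p / k ≤ p ∧ (p / k) * k = p ∧ p / (p / k) = k := by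
  have hmul : p / k * k = p := Int.ediv_mul_cancel hkd
  have hm1 : 1 ≤ p / k := by nlinarith
  have hdvd : p / k ∣ p := ⟨k, hmul.symm⟩
  refine ⟨hm1, hdvd, Int.le_of_dvd (by omega) hdvd, hmul, ?_⟩
  have h2 := Int.mul_ediv_cancel_left (a := p / k) k (by omega)
  rw [hmul] at h2
  exact h2

theorem card_high_eq_low (p : Int) (h1 : 1 ≤ p) :
    (((Finset.Icc 1 p)).filter (fun k => k ∣ p ∧ p < k * k)).card
      = (((Finset.Icc 1 p)).filter (fun k => k ∣ p ∧ k * k < p)).card := by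
  apply Finset.card_bij' (i := fun k _ => p / k) (j := fun k _ => p / k)
  · intro k hk
    simp only [Finset.mem_filter, Finset.mem_Icc] at hk ⊢
    obtain ⟨⟨hk1, hkp⟩, hkd, hkg⟩ := hk
    obtain ⟨hm1, hmd, hmp, hmul, hinv⟩ := div_facts p k h1 hk1 hkd
    refine ⟨⟨hm1, hmp⟩, hmd, ?_⟩
    have hmk : p / k < k := by nlinarith
    nlinarith
  · intro k hk
    simp only [Finset.mem_filter, Finset.mem_Icc] at hk ⊢
    obtain ⟨⟨hk1, hkp⟩, hkd, hkl⟩ := hk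
    obtain ⟨hm1, hmd, hmp, hmul, hinv⟩ := div_facts p k h1 hk1 hkd
    refine ⟨⟨hm1, hmp⟩, hmd, ?_⟩
    have hmk : k < p / k := by nlinarith
    nlinarith
  · intro k hk
    simp only [Finset.mem_filter, Finset.mem_Icc] at hk
    exact (div_facts p k h1 hk.1.1 hk.2.1).2.2.2.2
  · intro k hk
    simp only [Finset.mem_filter, Finset.mem_Icc] at hk
    exact (div_facts p k h1 hk.1.1 hk.2.1).2.2.2.2

theorem card_div_split (p : Int) (h1 : 1 ≤ p) :
    ((Finset.Icc 1 p).filter (fun k => k ∣ p)).card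
      = 2 * ((Finset.Icc 1 p).filter (fun k => k ∣ p ∧ k * k < p)).card
        + ((Finset.Icc 1 p).filter (fun k => k * k = p)).card := by
  have e1 := Finset.card_filter_add_card_filter_not
      (s := (Finset.Icc 1 p).filter (fun k => k ∣ p)) (p := fun k => k * k < p)
  rw [Finset.filter_filter, Finset.filter_filter] at e1
  have e2 := Finset.card_filter_add_card_filter_not
      (s := (Finset.Icc 1 p).filter (fun k => k ∣ p ∧ ¬ k * k < p)) (p := fun k => k * k = p)
  rw [Finset.filter_filter, Finset.filter_filter] at e2
  have heq1 : (Finset.Icc 1 p).filter (fun k => (k ∣ p ∧ ¬ k * k < p) ∧ k * k = p)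
      = (Finset.Icc 1 p).filter (fun k => k * k = p) := by
    apply Finset.filter_congr
    intro k _
    constructor
    · rintro ⟨-, hsq⟩; exact hsq
    · intro hsq; exact ⟨⟨⟨k, hsq.symm⟩, by omega⟩, hsq⟩
  have heq2 : (Finset.Icc 1 p).filter (fun k => (k ∣ p ∧ ¬ k * k < p) ∧ ¬ k * k = p)
      = (Finset.Icc 1 p).filter (fun k => k ∣ p ∧ p < k * k) := by
    apply Finset.filter_congr
    intro k _
    constructor
    · rintro ⟨⟨hd, hnl⟩, hne⟩; exact ⟨hd, by omega⟩
    · rintro ⟨hd, hg⟩; exact ⟨⟨hd, by omega⟩, by omega⟩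
  rw [heq1, heq2] at e2
  rw [card_high_eq_low p h1] at e2
  omega

theorem mem_pair_range_iff (limit p k : Int) (hk : 1 ≤ k) (h1 : 1 ≤ p) (h2 : p ≤ limit) :
    p ∈ PySem.List.pyRange (k * (k + 1)) (limit + 1) k ↔ (k ∣ p ∧ k * k < p) := by
  rw [PySem.List.mem_pyRange_iff_of_pos (by omega) p]
  have hdv : k ∣ p - k * (k + 1) ↔ k ∣ p :=
    ⟨fun h => by simpa using dvd_add h (dvd_mul_right k (k + 1)),
     fun h => dvd_sub h (dvd_mul_right k (k + 1))⟩
  constructor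
  · rintro ⟨hle, -, hd⟩
    have hd' := hdv.mp hd
    exact ⟨hd', by nlinarith⟩
  · rintro ⟨hd, hlt⟩
    refine ⟨?_, by omega, hdv.mpr hd⟩
    obtain ⟨m, rfl⟩ := hd
    have : k < m := by nlinarith
    nlinarith

theorem pairing (limit p : Int) (h1 : 1 ≤ p) (h2 : p ≤ limit) :
    ((PySem.List.pyRange 1 (pvR limit + 1) 1).map (fun k =>
        (if k * k = p then (1 : Int) else 0)
        + (if p ∈ PySem.List.pyRange (k * (k + 1)) (limit + 1) k then 2 else 0))).sum
      = pvDC p := by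
  have hcong : ∀ k ∈ PySem.List.pyRange 1 (pvR limit + 1) 1,
      (fun k => (if k * k = p then (1 : Int) else 0)
        + (if p ∈ PySem.List.pyRange (k * (k + 1)) (limit + 1) k then 2 else 0)) k
      = (fun k => (if (fun k => decide (k * k = p)) k = true then (1 : Int) else 0)
        + 2 * (if (fun k => decide (k ∣ p ∧ k * k < p)) k = true then (1 : Int) else 0)) k := by
    intro k hk
    rw [PySem.List.mem_pyRange_one] at hk
    simp only [decide_eq_true_eq]
    congr 1
    simp only [mem_pair_range_iff limit p k (by omega) h1 h2]
    split_ifs <;> ring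
  rw [List.map_congr_left hcong]
  rw [PySem.List.sum_map_add_int, List.sum_map_mul_left]
  rw [PySem.List.sum_map_ite_one_zero, PySem.List.sum_map_ite_one_zero]
  rw [countP_pyRange_eq_card, countP_pyRange_eq_card]
  unfold pvDC
  rw [countP_pyRange_eq_card]
  simp only [decide_eq_true_eq]
  have hset1 : (Finset.Icc 1 (pvR limit)).filter (fun k => k * k = p)
      = (Finset.Icc 1 p).filter (fun k => k * k = p) := by
    ext k
    simp only [Finset.mem_filter, Finset.mem_Icc]
    constructor
    · rintro ⟨⟨hk1, -⟩, hsq⟩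
      exact ⟨⟨hk1, by nlinarith [pv_le_mul_self k]⟩, hsq⟩
    · rintro ⟨⟨hk1, -⟩, hsq⟩
      exact ⟨⟨hk1, (le_pvR_iff limit k hk1).mpr (by omega)⟩, hsq⟩
  have hset2 : (Finset.Icc 1 (pvR limit)).filter (fun k => k ∣ p ∧ k * k < p)
      = (Finset.Icc 1 p).filter (fun k => k ∣ p ∧ k * k < p) := by
    ext k
    simp only [Finset.mem_filter, Finset.mem_Icc]
    constructor
    · rintro ⟨⟨hk1, -⟩, hd, hlt⟩
      exact ⟨⟨hk1, Int.le_of_dvd (by omega) hd⟩, hd, hlt⟩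
    · rintro ⟨⟨hk1, -⟩, hd, hlt⟩
      exact ⟨⟨hk1, (le_pvR_iff limit k hk1).mpr (by omega)⟩, hd, hlt⟩
  rw [hset1, hset2, card_div_split p h1]
  push_cast
  ring

theorem bVal (limit p : Int) (h0 : 0 ≤ limit) (h1 : 1 ≤ p) (h2 : p ≤ limit) :
    pyArrGetD (pairSieve limit (Array.replicate (limit + 1).toNat 0) 1) p 0 = pvDC p := by
  have hlen : ((Array.replicate (limit + 1).toNat (0:Int)).size : Int) = limit + 1 := by
    simp
    omega
  rw [pairSieve_get_aux ((limit + 1 - 1).toNat) limit _ 1 p (by omega) (by omega) hlen (by omega)]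
  have hz : pyArrGetD (Array.replicate (limit + 1).toNat (0:Int)) p 0 = 0 := by
    unfold pyArrGetD
    split_ifs <;> simp
  rw [hz, zero_add, bTotal_eq_sum_aux ((limit + 1 - 1).toNat) limit 1 p (by omega) (by omega),
    pairing limit p h1 h2]

-- ===== VERDICT (by name: the statement is the Claim_ definition above) =====
theorem compute_anti_primes_spec : Claim_equal_compute_anti_primes := by
  intro limit _
  unfold Spec_compute_anti_primes compute_anti_primes compute_anti_primes_alt
  by_cases hneg : limit ≤ 0
  · rw [PySem.List.pyRange_one_eq_nil (by omega : limit + 1 ≤ 1)]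
    rfl
  · replace hneg : 0 < limit := by omega
    refine congrArg Prod.fst ?_
    refine PySem.List.foldl_congr_mem _ _ _ _ ?_
    intro acc m hm
    rw [PySem.List.mem_pyRange_one] at hm
    rw [aVal limit m hm.1 (by omega), bVal limit m (by omega) hm.1 (by omega)]
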